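-- pv_equiv track=rewrite | github.com/KayoJules/GA-Tetris | AI_player.py | evaluate_ledges
-- ===== SOURCE A (Python) =====
-- def evaluate_ledges(squares):
--     space_left = []
--     for column in squares:
--         appended = False
--         for index, sq in enumerate(column):
--             # check every square
--             if sq != 'none':
--                 space_left.append(index)
--                 appended = True
--                 break
--         if not appended:
--             space_left.append(len(column))
--
--     num_ledges = 0
--
--     for i in range (1, len(space_left)):
--         if abs(space_left[i] - space_left[i-1]) >= 3:
--             num_ledges += 1
--
--     return num_ledges
-- ===== SOURCE B (Python) =====
-- def evaluate_ledges(squares):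
--     # Lockstep pairwise scan: for each adjacent pair of columns, walk rows
--     # together until one column is filled; a ledge exists iff the other column
--     # is still empty at that row and the next two rows. No heights computed.
--     def filled(col, i):
--         return i >= len(col) or col[i] != 'none'
--
--     num_ledges = 0
--     for left, right in zip(squares, squares[1:]):
--         k = 0
--         while not (filled(left, k) or filled(right, k)):
--             k += 1
--         lag = right if filled(left, k) else left
--         if not (filled(lag, k) or filled(lag, k + 1) or filled(lag, k + 2)):
--             num_ledges += 1
--     return num_ledges
-- ===== Notes on version B (the rewrite author's own statement) =====
-- stated objective: alternative
-- what changed: B never computes column heights or an index list: it walks each adjacent pair of columns in lockstep row by row until one is filled and decides the ledge by probing whether the lagging column is still empty at that row and the next two, replacing A's two staged passes (build space_left, then scan adjacent differences with abs) with a pairwise comparison containing no subtraction or abs.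
import Mathlib
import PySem

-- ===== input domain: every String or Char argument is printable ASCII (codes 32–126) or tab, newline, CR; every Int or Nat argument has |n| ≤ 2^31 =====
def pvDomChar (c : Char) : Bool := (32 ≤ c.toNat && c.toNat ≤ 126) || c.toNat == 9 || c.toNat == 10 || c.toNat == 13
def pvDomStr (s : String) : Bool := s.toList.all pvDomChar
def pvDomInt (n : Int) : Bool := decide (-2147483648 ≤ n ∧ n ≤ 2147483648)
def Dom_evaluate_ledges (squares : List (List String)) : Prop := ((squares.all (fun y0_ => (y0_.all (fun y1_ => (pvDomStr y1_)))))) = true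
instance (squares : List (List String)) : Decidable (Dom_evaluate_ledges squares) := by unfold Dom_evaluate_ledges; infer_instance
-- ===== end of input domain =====

-- B replaces A's two passes (build the space_left height list, then compare adjacent
-- entries with abs) by a lockstep row scan of each adjacent column pair with no
-- heights, subtraction or abs at all (objective: alternative).

-- ===== PORT A =====
-- A's inner loop: scan `column` with a running index, return the first index whose
-- square is not 'none' (the break), else len(column) (the `not appended` branch).
def aScan (column : List String) : Nat → List String → Int
  | _, [] => (column.length : Int)
  | i, sq :: rest => if sq ≠ "none" then (i : Int) else aScan column (i + 1) rest

def evaluate_ledges (squares : List (List String)) : Int :=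
  let space_left := squares.foldl (fun acc column => acc ++ [aScan column 0 column]) ([] : List Int)
  (PySem.List.pyRange 1 (space_left.length : Int) 1).foldl
    (fun n i =>
      if (PySem.List.pyGetD space_left i 0 - PySem.List.pyGetD space_left (i - 1) 0).natAbs ≥ 3
      then n + 1 else n) 0

-- ===== PORT B =====
-- filled(col, i): row i is past the bottom of the column or holds a piece.
def bFilled (col : List String) (i : Nat) : Bool :=
  decide (col.length ≤ i) || decide (col.getD i "" ≠ "none")

-- the while loop: first row index at which either column is filled.
def bMeet (a b : List String) (k : Nat) : Nat :=
  if h : bFilled a k || bFilled b k then k else bMeet a b (k + 1)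
  termination_by a.length - k
  decreasing_by
    simp only [Bool.or_eq_true, not_or] at h
    simp only [bFilled, Bool.or_eq_true, decide_eq_true_eq] at h
    omega

-- probe the lagging column at the meeting row and the next two rows.
def bProbe (lag : List String) (k : Nat) : Bool :=
  !(bFilled lag k || bFilled lag (k + 1) || bFilled lag (k + 2))

def bLedge (a b : List String) : Bool :=
  bProbe (if bFilled a (bMeet a b 0) then b else a) (bMeet a b 0)

def evaluate_ledges_alt (squares : List (List String)) : Int :=
  (squares.zip squares.tail).foldl
    (fun n p => if bLedge p.1 p.2 then n + 1 else n) 0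

-- ===== PRECONDITION & SPEC =====
def Spec_evaluate_ledges (squares : List (List String)) (out : Int) : Prop := out = evaluate_ledges_alt squares
instance (squares : List (List String)) (out : Int) : Decidable (Spec_evaluate_ledges squares out) := by unfold Spec_evaluate_ledges; infer_instance

-- ===== CLAIM (what is proved, stated in full; the proofs are below) =====
def Claim_equal_evaluate_ledges : Prop := ∀ (squares : List (List String)), Dom_evaluate_ledges squares → Spec_evaluate_ledges squares (evaluate_ledges squares)

-- ===== LEMMAS AND PROOFS =====

-- first-filled row of a column, as a Nat (the column's "height").
def hN (col : List String) : Nat :=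
  match col.findIdx? (fun sq => sq ≠ "none") with
  | some j => j
  | none => col.length

-- Number of adjacent pairs of heights that differ by at least 3.
def pairCount : List Int → Int
  | a :: b :: rest => (if (b - a).natAbs ≥ 3 then 1 else 0) + pairCount (b :: rest)
  | _ => 0

theorem pairCount_short (l : List Int) (h : l.length ≤ 1) : pairCount l = 0 := by
  match l with
  | [] => rfl
  | [_] => rfl
  | _ :: _ :: _ => simp at h

-- the height is the first filled row: filled there, unfilled strictly above.
theorem hN_spec (col : List String) :
    bFilled col (hN col) = true ∧ ∀ j, j < hN col → bFilled col j = false := by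
  induction col with
  | nil => exact ⟨by simp [hN, bFilled], by simp [hN]⟩
  | cons s rest ih =>
    by_cases hs : s ≠ "none"
    · have h0 : hN (s :: rest) = 0 := by simp [hN, List.findIdx?_cons, hs]
      exact ⟨by simp [h0, bFilled, hs], by simp [h0]⟩
    · push Not at hs
      have h1 : hN (s :: rest) = hN rest + 1 := by
        simp only [hN, List.findIdx?_cons, hs]
        simp only [ne_eq, not_true_eq_false, decide_false]
        cases rest.findIdx? (fun sq => sq ≠ "none") <;> simp [List.length_cons]
      have hstep : ∀ j, bFilled (s :: rest) (j + 1) = bFilled rest j := by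
        intro j; simp [bFilled, List.length_cons]
      refine ⟨by rw [h1, hstep]; exact ih.1, ?_⟩
      intro j hj
      match j with
      | 0 => simp [bFilled, hs]
      | j + 1 => rw [hstep]; exact ih.2 j (by omega)
theorem bMeet_eq (a b : List String) :
    ∀ (n k : Nat), n = min (hN a) (hN b) - k → k ≤ min (hN a) (hN b) →
      bMeet a b k = min (hN a) (hN b) := by
  intro n
  induction n with
  | zero =>
    intro k hn hk
    have hkeq : k = min (hN a) (hN b) := by omega
    rcases Nat.le_total (hN a) (hN b) with hle | hle
    · have hfa : bFilled a k = true := by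
        rw [hkeq, Nat.min_eq_left hle]; exact (hN_spec a).1
      rw [bMeet, dif_pos (by simp [hfa])]; exact hkeq
    · have hfb : bFilled b k = true := by
        rw [hkeq, Nat.min_eq_right hle]; exact (hN_spec b).1
      rw [bMeet, dif_pos (by simp [hfb])]; exact hkeq
  | succ n ih =>
    intro k hn hk
    have hka : k < hN a := by omega
    have hkb : k < hN b := by omega
    have hfa := (hN_spec a).2 k hka
    have hfb := (hN_spec b).2 k hkb
    rw [bMeet, dif_neg (by simp [hfa, hfb])]
    exact ih (k + 1) (by omega) (by omega)

theorem bLedge_eq (a b : List String) :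
    bLedge a b = decide (3 ≤ ((hN b : Int) - (hN a : Int)).natAbs) := by
  have hk : bMeet a b 0 = min (hN a) (hN b) :=
    bMeet_eq a b (min (hN a) (hN b)) 0 (by omega) (by omega)
  unfold bLedge bProbe
  rw [hk]
  rcases Nat.le_total (hN a) (hN b) with hle | hle
  · rw [Nat.min_eq_left hle]
    have hfa : bFilled a (hN a) = true := (hN_spec a).1
    rw [if_pos hfa]
    by_cases hbig : hN a + 3 ≤ hN b
    · have h0 := (hN_spec b).2 (hN a) (by omega)
      have h1 := (hN_spec b).2 (hN a + 1) (by omega)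
      have h2 := (hN_spec b).2 (hN a + 2) (by omega)
      simp [h0, h1, h2]
      omega
    · have hmem : hN b = hN a ∨ hN b = hN a + 1 ∨ hN b = hN a + 2 := by omega
      have hfb : bFilled b (hN b) = true := (hN_spec b).1
      have : bFilled b (hN a) = true ∨ bFilled b (hN a + 1) = true ∨ bFilled b (hN a + 2) = true := by
        rcases hmem with h | h | h <;> rw [← h] <;> simp [hfb]
      rcases this with h | h | h <;> simp [h] <;> omega
  · rw [Nat.min_eq_right hle]
    by_cases heq : hN a = hN b
    · -- equal heights: same as the previous branch's small case
      have hfa : bFilled a (hN b) = true := by rw [← heq]; exact (hN_spec a).1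
      rw [if_pos hfa]
      have hfb : bFilled b (hN b) = true := (hN_spec b).1
      simp [hfb]
      omega
    · have hlt : hN b < hN a := by omega
      have hfa : bFilled a (hN b) = false := (hN_spec a).2 (hN b) hlt
      rw [if_neg (by simp [hfa])]
      by_cases hbig : hN b + 3 ≤ hN a
      · have h0 : bFilled a (hN b) = false := hfa
        have h1 := (hN_spec a).2 (hN b + 1) (by omega)
        have h2 := (hN_spec a).2 (hN b + 2) (by omega)
        simp [h0, h1, h2]
        omega
      · have hmem : hN a = hN b + 1 ∨ hN a = hN b + 2 := by omega
        have hfaa : bFilled a (hN a) = true := (hN_spec a).1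
        have : bFilled a (hN b + 1) = true ∨ bFilled a (hN b + 2) = true := by
          rcases hmem with h | h <;> rw [← h] <;> simp [hfaa]
        rcases this with h | h <;> simp [hfa, h] <;> omega

-- B's zip fold counts the large adjacent differences of the heights list.
theorem zip_fold (l : List (List String)) :
    ∀ acc : Int,
      (l.zip l.tail).foldl (fun n p => if bLedge p.1 p.2 then n + 1 else n) acc
        = acc + pairCount (l.map (fun c => (hN c : Int))) := by
  induction l with
  | nil => intro acc; simp [pairCount]
  | cons x rest ih =>
    intro acc
    cases rest with
    | nil => simp [pairCount]
    | cons y rest' =>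
      simp only [List.tail_cons, List.zip_cons_cons, List.foldl_cons, List.map_cons, pairCount]
      have htail : (y :: rest').zip rest' = ((y :: rest').zip (y :: rest').tail) := by simp
      rw [htail, ih]
      rw [bLedge_eq]
      by_cases hc : 3 ≤ ((hN y : Int) - (hN x : Int)).natAbs <;> simp [hc] <;> ring

-- A's inner scan equals the first-filled index (default length).
theorem aScan_eq_hN_aux (column : List String) :
    ∀ (rest : List String) (i : Nat),
      aScan column i rest =
        match rest.findIdx? (fun sq => sq ≠ "none") with
        | some j => ((i + j : Nat) : Int)
        | none => (column.length : Int) := by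
  intro rest
  induction rest with
  | nil => intro i; simp [aScan]
  | cons sq rest ih =>
    intro i
    by_cases h : sq ≠ "none"
    · simp [aScan, h, List.findIdx?_cons]
    · simp only [aScan, List.findIdx?_cons, decide_eq_true_eq]
      rw [ih (i + 1)]
      simp only [ne_eq, h]
      simp only [decide_false, Bool.false_eq_true, if_false]
      cases hfind : rest.findIdx? (fun sq => sq ≠ "none") with
      | none => simp
      | some j => simp; ring

theorem aScan_eq_hN (column : List String) : aScan column 0 column = (hN column : Int) := by
  rw [aScan_eq_hN_aux column column 0, hN]
  cases column.findIdx? (fun sq => sq ≠ "none") <;> simp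

-- A's indexed second loop, started at index k ≥ 1, counts the large adjacent
-- differences of the suffix of the heights list starting at k-1.
theorem idx_count (l : List Int) :
    ∀ (n k : Nat) (acc : Int), 1 ≤ k → n = l.length - k →
      (PySem.List.pyRange (k : Int) (l.length : Int) 1).foldl
        (fun m i =>
          if (PySem.List.pyGetD l i 0 - PySem.List.pyGetD l (i - 1) 0).natAbs ≥ 3
          then m + 1 else m) acc
      = acc + pairCount (l.drop (k - 1)) := by
  intro n
  induction n with
  | zero =>
    intro k acc hk hn
    have hlen : l.length ≤ k := by omega
    have hempty : PySem.List.pyRange (k : Int) (l.length : Int) 1 = [] := by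
      simp [PySem.List.pyRange]; omega
    rw [hempty]
    have : (l.drop (k - 1)).length ≤ 1 := by
      rw [List.length_drop]; omega
    rw [pairCount_short _ this]
    simp
  | succ n ih =>
    intro k acc hk hn
    have hklt : k < l.length := by omega
    rw [PySem.List.pyRange_one_cons (by exact_mod_cast hklt)]
    simp only [List.foldl_cons]
    have hsub : (k : Int) - 1 = ((k - 1 : Nat) : Int) := by omega
    rw [hsub, PySem.List.pyGetD_natCast, PySem.List.pyGetD_natCast]
    have hk1 : k - 1 < l.length := by omega
    have hdrop1 : l.drop (k - 1) = l[k - 1] :: l.drop (k - 1 + 1) := List.drop_eq_getElem_cons hk1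
    have hk0 : k - 1 + 1 = k := by omega
    have hdrop2 : l.drop k = l[k] :: l.drop (k + 1) := List.drop_eq_getElem_cons hklt
    have hcast : ((k : Int) + 1) = ((k + 1 : Nat) : Int) := by omega
    rw [hcast, ih (k + 1) _ (by omega) (by omega)]
    simp only [Nat.add_sub_cancel]
    rw [hdrop1, hk0, hdrop2, pairCount]
    rw [List.getD_eq_getElem l 0 hklt, List.getD_eq_getElem l 0 hk1]
    by_cases hc : (l[k] - l[k - 1]).natAbs ≥ 3 <;> simp [hc] <;> ring

theorem a_eq_pairCount (squares : List (List String)) :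
    evaluate_ledges squares = pairCount (squares.map (fun c => aScan c 0 c)) := by
  unfold evaluate_ledges
  rw [PySem.List.foldl_append_singleton_eq_map]
  simp only [List.nil_append]
  have h := idx_count (squares.map fun column => aScan column 0 column)
      ((squares.map fun column => aScan column 0 column).length - 1) 1 0 (le_refl 1) rfl
  simpa using h

-- ===== VERDICT (by name: the statement is the Claim_ definition above) =====
theorem evaluate_ledges_spec : Claim_equal_evaluate_ledges := by
  intro squares _
  unfold Spec_evaluate_ledges
  rw [a_eq_pairCount]
  unfold evaluate_ledges_alt
  rw [zip_fold, zero_add]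
  congr 1
  exact List.map_congr_left (fun c _ => aScan_eq_hN c)
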